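-- pv_equiv track=rewrite | github.com/IES-Rafael-Alberti/2324-u2-sentencias-repetitivas-Lobato14 | src/Ejercicio_8.py | triangulo_rectangulo
-- ===== SOURCE A (Python) =====
-- def triangulo_rectangulo(numEnt):
--     if not isinstance(numEnt, int) or numEnt <= 0:
--         return "Debes ingresar un número entero positivo."
--
--     resultado = ""
--     for numero in range(1, numEnt + 1, 2):
--         for numero2 in range(numero, 0, -2):
--             resultado += f"{numero2} "
--         resultado += "\n"
--     return resultado
-- ===== SOURCE B (Python) =====
-- def triangulo_rectangulo(numEnt):
--     if not isinstance(numEnt, int) or numEnt <= 0: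
--         return "Debes ingresar un número entero positivo."
--
--     resultado = ""
--     prev = ""
--     for numero in range(1, numEnt + 1, 2):
--         fila = f"{numero} " + prev
--         resultado += fila + "\n"
--         prev = fila
--     return resultado
-- ===== Notes on version B (the rewrite author's own statement) =====
-- stated objective: alternative
-- what changed: Replaces the nested descending inner loop by a single accumulator-threaded pass: each row is the new odd number prepended to the previously built row.
import Mathlib
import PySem

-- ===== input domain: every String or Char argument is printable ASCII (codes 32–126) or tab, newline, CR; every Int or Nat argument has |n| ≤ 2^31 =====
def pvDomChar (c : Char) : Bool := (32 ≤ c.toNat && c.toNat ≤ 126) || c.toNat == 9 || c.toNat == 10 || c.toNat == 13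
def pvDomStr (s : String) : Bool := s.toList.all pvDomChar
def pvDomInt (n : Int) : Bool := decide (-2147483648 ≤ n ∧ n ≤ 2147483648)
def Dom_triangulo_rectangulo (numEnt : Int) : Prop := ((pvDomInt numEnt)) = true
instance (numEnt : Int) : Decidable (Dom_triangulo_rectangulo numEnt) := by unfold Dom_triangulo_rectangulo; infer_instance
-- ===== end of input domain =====

-- B replaces A's nested descending inner loop by a single accumulator-threaded pass that
-- builds each row by prepending the new odd number to the previously built row;
-- same return value everywhere (A is total).


-- ===== PORT A =====
-- literal port of A: outer loop over range(1, numEnt+1, 2), inner descending loop range(numero, 0, -2)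
def triangulo_rectangulo (numEnt : Int) : String :=
  if numEnt ≤ 0 then "Debes ingresar un número entero positivo."
  else
    (PySem.List.pyRange 1 (numEnt + 1) 2).foldl
      (fun resultado numero =>
        ((PySem.List.pyRange numero 0 (-2)).foldl
          (fun r n2 => r ++ PySem.Int.toStr n2 ++ " ") resultado) ++ "\n")
      ""

-- ===== PORT B =====
-- port of B: single loop; state = (resultado, prev row); each row = new odd number prepended to prev
def triangulo_rectangulo_alt (numEnt : Int) : String :=
  if numEnt ≤ 0 then "Debes ingresar un número entero positivo."
  else
    ((PySem.List.pyRange 1 (numEnt + 1) 2).foldl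
      (fun (st : String × String) numero =>
        let fila := PySem.Int.toStr numero ++ " " ++ st.2
        (st.1 ++ fila ++ "\n", fila))
      ("", "")).1

-- ===== PRECONDITION & SPEC =====
def Spec_triangulo_rectangulo (numEnt : Int) (out : String) : Prop := out = triangulo_rectangulo_alt numEnt
instance (numEnt : Int) (out : String) : Decidable (Spec_triangulo_rectangulo numEnt out) := by unfold Spec_triangulo_rectangulo; infer_instance

-- ===== CLAIM (what is proved, stated in full; the proofs are below) =====
def Claim_equal_triangulo_rectangulo : Prop := ∀ (numEnt : Int), Dom_triangulo_rectangulo numEnt → Spec_triangulo_rectangulo numEnt (triangulo_rectangulo numEnt)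

-- ===== LEMMAS AND PROOFS =====

-- row with leading odd number 2*j-1 (descending down to 1), trailing space; rowS 0 = ""
def rowS : Nat → String
  | 0 => ""
  | j+1 => PySem.Int.toStr (2*(j:Int)+1) ++ " " ++ rowS j

-- concatenation of rows j+1 .. j+k, each followed by "\n"
def resS : Nat → Nat → String
  | _, 0 => ""
  | j, k+1 => rowS (j+1) ++ "\n" ++ resS (j+1) k

theorem pyRange_two_cons (a b : Int) (h : a < b) :
    PySem.List.pyRange a b 2 = a :: PySem.List.pyRange (a+2) b 2 := by
  rw [PySem.List.pyRange_of_pos _ _ (by norm_num : (0:Int) < 2),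
      PySem.List.pyRange_of_pos _ _ (by norm_num : (0:Int) < 2)]
  rw [if_pos h]
  have hc : ((b - a + 2 - 1)/2).toNat
      = (if a + 2 < b then ((b - (a+2) + 2 - 1)/2).toNat else 0) + 1 := by
    split_ifs <;> omega
  rw [hc, List.range_succ_eq_map, List.map_cons, List.map_map]
  congr 1
  · norm_num
  · apply List.map_congr_left; intro k _; simp only [Function.comp_apply]; push_cast; ring

theorem pyRange_two_nil (a b : Int) (h : b ≤ a) :
    PySem.List.pyRange a b 2 = [] := by
  rw [PySem.List.pyRange_of_pos _ _ (by norm_num : (0:Int) < 2), if_neg (by omega)]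
  simp

theorem pyRange_negtwo_cons (a : Int) (h : 0 < a) :
    PySem.List.pyRange a 0 (-2) = a :: PySem.List.pyRange (a-2) 0 (-2) := by
  simp only [PySem.List.pyRange]
  norm_num
  rw [if_pos h]
  have hc : ((a + 2 - 1)/2).toNat = (if 2 < a then ((a - 1) / 2).toNat else 0) + 1 := by
    split_ifs <;> omega
  rw [hc, List.range_succ_eq_map, List.map_cons, List.map_map]
  congr 1
  · norm_num
  · apply List.map_congr_left; intro k _; simp only [Function.comp_apply]; push_cast; ring

theorem pyRange_negtwo_nil (a : Int) (h : a ≤ 0) :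
    PySem.List.pyRange a 0 (-2) = [] := by
  simp only [PySem.List.pyRange]
  norm_num
  intro h'
  omega

-- A's inner loop starting at the odd number 2*j+1 appends exactly rowS (j+1)
theorem innerA (j : Nat) : ∀ acc : String,
    (PySem.List.pyRange (2*(j:Int)+1) 0 (-2)).foldl
      (fun r n2 => r ++ PySem.Int.toStr n2 ++ " ") acc = acc ++ rowS (j+1) := by
  induction j with
  | zero =>
    intro acc
    norm_num
    rw [pyRange_negtwo_cons 1 (by norm_num)]
    rw [show ((1:Int) - 2) = -1 by norm_num, pyRange_negtwo_nil (-1) (by norm_num)]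
    simp [rowS, String.append_assoc]
  | succ j ih =>
    intro acc
    have h1 : (2*((j:Int)+1)+1) = (2*(j:Int)+1) + 2 := by ring
    rw [pyRange_negtwo_cons _ (by positivity), show (2*((j:Nat)+1:Nat):Int)+1 - 2 = 2*(j:Int)+1 by push_cast; ring]
    rw [List.foldl_cons, ih]
    simp [rowS, String.append_assoc]

-- A's outer loop over the k odd numbers 2*j+1, …, 2*(j+k)-1
theorem outerA (k : Nat) : ∀ (j : Nat) (b : Int) (acc : String),
    2*(j:Int) + 2*(k:Int) - 1 < b → b ≤ 2*(j:Int) + 2*(k:Int) + 1 →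
    (PySem.List.pyRange (2*(j:Int)+1) b 2).foldl
      (fun resultado numero =>
        ((PySem.List.pyRange numero 0 (-2)).foldl
          (fun r n2 => r ++ PySem.Int.toStr n2 ++ " ") resultado) ++ "\n") acc
      = acc ++ resS j k := by
  induction k with
  | zero =>
    intro j b acc h1 h2
    rw [pyRange_two_nil _ _ (by push_cast at h1 h2 ⊢; omega)]
    simp [resS]
  | succ k ih =>
    intro j b acc h1 h2
    rw [pyRange_two_cons _ _ (by push_cast at h1 h2 ⊢; omega), List.foldl_cons, innerA j]
    rw [show (2*(j:Int)+1) + 2 = 2*((j:Nat)+1:Nat)+1 by push_cast; ring]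
    rw [ih (j+1) b _ (by push_cast at h1 h2 ⊢; omega) (by push_cast at h1 h2 ⊢; omega)]
    simp [resS, String.append_assoc]

-- B's loop over the same odd numbers, threading (resultado, prev row)
theorem outerB (k : Nat) : ∀ (j : Nat) (b : Int) (acc : String),
    2*(j:Int) + 2*(k:Int) - 1 < b → b ≤ 2*(j:Int) + 2*(k:Int) + 1 →
    (PySem.List.pyRange (2*(j:Int)+1) b 2).foldl
      (fun (st : String × String) numero =>
        let fila := PySem.Int.toStr numero ++ " " ++ st.2
        (st.1 ++ fila ++ "\n", fila))
      (acc, rowS j)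
      = (acc ++ resS j k, rowS (j+k)) := by
  induction k with
  | zero =>
    intro j b acc h1 h2
    rw [pyRange_two_nil _ _ (by push_cast at h1 h2 ⊢; omega)]
    simp [resS]
  | succ k ih =>
    intro j b acc h1 h2
    rw [pyRange_two_cons _ _ (by push_cast at h1 h2 ⊢; omega), List.foldl_cons]
    have hrow : PySem.Int.toStr (2*(j:Int)+1) ++ " " ++ rowS j = rowS (j+1) := by
      simp [rowS]
    simp only []
    rw [hrow]
    rw [show (2*(j:Int)+1) + 2 = 2*((j:Nat)+1:Nat)+1 by push_cast; ring]
    rw [ih (j+1) b _ (by push_cast at h1 h2 ⊢; omega) (by push_cast at h1 h2 ⊢; omega)]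
    refine congrArg₂ Prod.mk ?_ ?_
    · simp [resS, String.append_assoc]
    · congr 1
      omega

-- ===== VERDICT (by name: the statement is the Claim_ definition above) =====
theorem triangulo_rectangulo_spec : Claim_equal_triangulo_rectangulo := by
  intro numEnt _
  unfold Spec_triangulo_rectangulo triangulo_rectangulo triangulo_rectangulo_alt
  by_cases h : numEnt ≤ 0
  · rw [if_pos h, if_pos h]
  · rw [if_neg h, if_neg h]
    replace h : 0 < numEnt := by omega
    obtain ⟨m, rfl⟩ : ∃ m : Nat, numEnt = (m:Int) := ⟨numEnt.toNat, by omega⟩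
    set k := (m+1)/2 with hk
    have hb1 : 2*((0:Nat):Int) + 2*(k:Int) - 1 < (m:Int) + 1 := by push_cast; omega
    have hb2 : (m:Int) + 1 ≤ 2*((0:Nat):Int) + 2*(k:Int) + 1 := by push_cast; omega
    have hA := outerA k 0 ((m:Int)+1) "" (by exact_mod_cast hb1) (by exact_mod_cast hb2)
    have hB := outerB k 0 ((m:Int)+1) "" (by exact_mod_cast hb1) (by exact_mod_cast hb2)
    simp only [Nat.cast_zero, mul_zero, zero_add] at hA hB
    rw [show (1 : Int) = 2*((0:Nat):Int)+1 by norm_num] at hA hB ⊢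
    rw [hA, show rowS 0 = "" from rfl] at *
    rw [hB]
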